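-- pv_equiv track=rewrite | github.com/Sunsvea/distributed-training-orchestrator | worker/distributed_strategies.py | create_hierarchy
-- ===== SOURCE A (Python) =====
-- from typing import Dict, List, Optional, Any, Tuple
--
-- def create_hierarchy(worker_ids: List[str], gpus_per_node: int = 4) -> Dict[str, List[str]]:
--     """Create hierarchical topology"""
--     hierarchy = {}
--
--     # Convert to list if needed
--     if not isinstance(worker_ids, list):
--         worker_ids = list(worker_ids)
--
--     # Group workers by node
--     num_nodes = len(worker_ids) // gpus_per_node + (1 if len(worker_ids) % gpus_per_node else 0)
--
--     for node_id in range(num_nodes):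
--         start_idx = node_id * gpus_per_node
--         end_idx = min(start_idx + gpus_per_node, len(worker_ids))
--         hierarchy[f"node-{node_id}"] = worker_ids[start_idx:end_idx]
--
--     return hierarchy
-- ===== SOURCE B (Python) =====
-- def create_hierarchy(worker_ids, gpus_per_node=4):
--     """Create hierarchical topology (single pass over workers)"""
--     if not isinstance(worker_ids, list):
--         worker_ids = list(worker_ids)
--     hierarchy = {}
--     for i, w in enumerate(worker_ids):
--         hierarchy.setdefault(f"node-{i // gpus_per_node}", []).append(w)
--     return hierarchy
-- ===== Notes on version B (the rewrite author's own statement) =====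
-- stated objective: simpler
-- what changed: One incremental pass over the workers with setdefault-append bucketing by i // gpus_per_node, instead of precomputing the node count and slicing the list once per node.
-- outside the precondition, e.g. on create_hierarchy(['a'], -2): A returns {}, B returns {'node-0': ['a']}; on create_hierarchy([], 0): A raises ZeroDivisionError, B returns {}
import Mathlib
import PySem

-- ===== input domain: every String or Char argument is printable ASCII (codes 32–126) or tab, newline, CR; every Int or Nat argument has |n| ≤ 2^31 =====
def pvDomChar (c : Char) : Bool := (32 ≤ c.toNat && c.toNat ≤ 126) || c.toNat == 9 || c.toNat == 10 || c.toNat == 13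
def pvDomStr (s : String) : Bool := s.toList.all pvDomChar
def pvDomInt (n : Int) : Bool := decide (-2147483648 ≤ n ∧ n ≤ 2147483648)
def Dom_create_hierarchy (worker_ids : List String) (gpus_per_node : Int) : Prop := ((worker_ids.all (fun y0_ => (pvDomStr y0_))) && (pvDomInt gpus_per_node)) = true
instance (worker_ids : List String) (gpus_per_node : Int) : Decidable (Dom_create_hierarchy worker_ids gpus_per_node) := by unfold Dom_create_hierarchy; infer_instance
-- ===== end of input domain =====

-- B groups the workers in one incremental setdefault-append pass keyed by i // gpus_per_node,
-- instead of A's per-node slicing loop; objective: simpler.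

-- ===== PORT A =====
def create_hierarchy (worker_ids : List String) (gpus_per_node : Int) : List (String × List String) :=
  let n : Int := (worker_ids.length : Int)
  let num_nodes : Int := PySem.Int.floordiv n gpus_per_node +
    (if PySem.Int.mod n gpus_per_node ≠ 0 then 1 else 0)
  ((PySem.List.pyRange 0 num_nodes 1).foldl
    (fun h node_id =>
      let start_idx := node_id * gpus_per_node
      let end_idx := min (start_idx + gpus_per_node) n
      h.insert ("node-" ++ PySem.Int.toStr node_id)
        (PySem.List.slice worker_ids (some start_idx) (some end_idx)))
    PySem.Dict.empty).items

-- ===== PORT B =====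
def create_hierarchy_alt (worker_ids : List String) (gpus_per_node : Int) : List (String × List String) :=
  ((PySem.List.enumerate worker_ids 0).foldl
    (fun h p =>
      h.modify ("node-" ++ PySem.Int.toStr (PySem.Int.floordiv p.1 gpus_per_node)) []
        (fun ws => ws ++ [p.2]))
    PySem.Dict.empty).items

-- ===== PRECONDITION & SPEC =====
-- Pre_ excludes gpus_per_node ≤ 0, outside the function's natural domain: A raises
-- ZeroDivisionError at 0, and for negative values A's empty result is an artefact of floor division.
def Pre_create_hierarchy (worker_ids : List String) (gpus_per_node : Int) : Prop :=
  0 < gpus_per_node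
instance (worker_ids : List String) (gpus_per_node : Int) : Decidable (Pre_create_hierarchy worker_ids gpus_per_node) := by unfold Pre_create_hierarchy; infer_instance
def pvWitness_create_hierarchy : List String × Int := (["w0", "w1", "w2"], 2)

def Spec_create_hierarchy (worker_ids : List String) (gpus_per_node : Int) (out : List (String × List String)) : Prop := out = create_hierarchy_alt worker_ids gpus_per_node
instance (worker_ids : List String) (gpus_per_node : Int) (out : List (String × List String)) : Decidable (Spec_create_hierarchy worker_ids gpus_per_node out) := by unfold Spec_create_hierarchy; infer_instance

-- ===== CLAIM (what is proved, stated in full; the proofs are below) =====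
def Claim_equal_create_hierarchy : Prop := ∀ (worker_ids : List String) (gpus_per_node : Int), Dom_create_hierarchy worker_ids gpus_per_node → Pre_create_hierarchy worker_ids gpus_per_node → Spec_create_hierarchy worker_ids gpus_per_node (create_hierarchy worker_ids gpus_per_node)

-- ===== LEMMAS AND PROOFS =====

/-- The node key written by both programs. -/
def pvKey (j : Int) : String := "node-" ++ PySem.Int.toStr j

/-- A's node count: ceil(n / g) written as floordiv plus a remainder flag. -/
def pvNum (n g : Int) : Int :=
  PySem.Int.floordiv n g + (if PySem.Int.mod n g ≠ 0 then 1 else 0)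

def pvDecode (l : List Char) : Nat := l.foldl (fun a c => a * 10 + (c.toNat - 48)) 0

theorem pv_toDigitsCore_append (f : Nat) : ∀ (n : Nat) (l : List Char),
    Nat.toDigitsCore 10 f n l = Nat.toDigitsCore 10 f n [] ++ l := by
  induction f with
  | zero => intro n l; simp [Nat.toDigitsCore]
  | succ f ih =>
    intro n l
    simp only [Nat.toDigitsCore]
    by_cases h : n / 10 = 0
    · simp [h]
    · simp only [h, if_false]
      rw [ih (n / 10) [Nat.digitChar (n % 10)], ih (n / 10) (Nat.digitChar (n % 10) :: l)]
      simp

theorem pv_decode_aux (l : List Char) (c : Char) (a : Nat) :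
    (l ++ [c]).foldl (fun a c => a * 10 + (c.toNat - 48)) a
      = (l.foldl (fun a c => a * 10 + (c.toNat - 48)) a) * 10 + (c.toNat - 48) := by
  simp [List.foldl_append]

theorem pv_decode_toDigitsCore (f : Nat) : ∀ (n : Nat), n < f →
    pvDecode (Nat.toDigitsCore 10 f n []) = n := by
  induction f with
  | zero => omega
  | succ f ih =>
    intro n hn
    have hd : ∀ m : Nat, m < 10 → (Nat.digitChar m).toNat - 48 = m := by decide
    simp only [Nat.toDigitsCore]
    by_cases h : n / 10 = 0
    · simp only [h, if_true]
      have : n < 10 := by omega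
      simp only [pvDecode, List.foldl_cons, List.foldl_nil, Nat.mod_eq_of_lt this]
      simpa using hd _ this
    · simp only [h, if_false]
      rw [pv_toDigitsCore_append]
      unfold pvDecode
      rw [pv_decode_aux]
      have h10 : n / 10 < f := by omega
      rw [show (Nat.toDigitsCore 10 f (n / 10) []).foldl (fun a c => a * 10 + (c.toNat - 48)) 0 = pvDecode (Nat.toDigitsCore 10 f (n / 10) []) from rfl, ih _ h10]
      rw [hd _ (Nat.mod_lt n (by norm_num))]
      omega

theorem pv_toDigits_inj {a b : Nat} (h : Nat.toDigits 10 a = Nat.toDigits 10 b) : a = b := by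
  have ha := pv_decode_toDigitsCore (a + 1) a (by omega)
  have hb := pv_decode_toDigitsCore (b + 1) b (by omega)
  unfold Nat.toDigits at h
  rw [h] at ha
  exact ha.symm.trans hb

theorem pv_toDigitsCore_no_dash (f : Nat) : ∀ (n : Nat) (l : List Char),
    (∀ c ∈ l, c ≠ '-') → ∀ c ∈ Nat.toDigitsCore 10 f n l, c ≠ '-' := by
  induction f with
  | zero => intro n l hl; simpa [Nat.toDigitsCore] using hl
  | succ f ih =>
    intro n l hl
    have hd : ∀ m : Nat, m < 10 → Nat.digitChar m ≠ '-' := by decide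
    simp only [Nat.toDigitsCore]
    by_cases h : n / 10 = 0
    · simp only [h, if_true]
      intro c hc
      rcases List.mem_cons.mp hc with rfl | hc
      · exact hd _ (Nat.mod_lt n (by norm_num))
      · exact hl c hc
    · simp only [h, if_false]
      refine ih (n / 10) _ ?_
      intro c hc
      rcases List.mem_cons.mp hc with rfl | hc
      · exact hd _ (Nat.mod_lt n (by norm_num))
      · exact hl c hc


theorem pv_no_dash (n : Nat) : '-' ∉ Nat.toDigits 10 n := by
  intro hm
  exact pv_toDigitsCore_no_dash (n+1) n [] (by simp) '-' hm rfl

theorem pv_toChars_inj : Function.Injective PySem.Int.toChars := by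
  intro a b h
  unfold PySem.Int.toChars at h
  split_ifs at h with ha hb hb
  · have := List.cons.injEq .. ▸ h
    have h2 : a.natAbs = b.natAbs := pv_toDigits_inj (by simpa using h)
    omega
  · exact absurd (h ▸ List.mem_cons_self) (pv_no_dash b.toNat)
  · exact absurd (h.symm ▸ List.mem_cons_self) (pv_no_dash a.toNat)
  · have := pv_toDigits_inj h
    omega

theorem pvKey_inj : Function.Injective pvKey := by
  intro a b h
  unfold pvKey at h
  have h2 : ("node-" ++ PySem.Int.toStr a).toList = ("node-" ++ PySem.Int.toStr b).toList := by rw [h]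
  simp only [String.toList_append, PySem.Int.toList_toStr, List.append_cancel_left_eq] at h2
  exact pv_toChars_inj h2


theorem pv_filter_interval {α : Type} (xs : List α) : ∀ (s a b : Int),
    ((PySem.List.enumerate xs s).filter (fun p => decide (a ≤ p.1 ∧ p.1 < b))).map (fun p => p.2)
      = (xs.take (b - s).toNat).drop (a - s).toNat := by
  induction xs with
  | nil => intro s a b; simp [PySem.List.enumerate]
  | cons x xs ih =>
    intro s a b
    rw [PySem.List.enumerate_cons]
    by_cases hc : a ≤ s ∧ s < b
    · have h1 : (b - s).toNat = (b - (s+1)).toNat + 1 := by omega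
      have h2 : (a - s).toNat = 0 := by omega
      have h3 : (a - (s+1)).toNat = 0 := by omega
      simp only [List.filter_cons, decide_eq_true_eq]
      rw [if_pos hc, List.map_cons, ih (s+1) a b, h1, h2, h3]
      simp
    · simp only [List.filter_cons, decide_eq_true_eq, hc, ite_false]
      rw [ih (s+1) a b]
      by_cases hb : s < b
      · have ha : s < a := by omega
        have h1 : (b - s).toNat = (b - (s+1)).toNat + 1 := by omega
        have h2 : (a - s).toNat = (a - (s+1)).toNat + 1 := by omega
        simp [h1, h2]
      · have h1 : (b - s).toNat = 0 := by omega
        have h2 : (b - (s+1)).toNat = 0 := by omega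
        simp [h1, h2]


theorem pv_ofList_map_inj {α β : Type} [BEq α] [LawfulBEq α] [BEq β] [LawfulBEq β]
    {k : α → β} (hk : Function.Injective k) (l : List α) :
    PySem.Set.ofList (l.map k) = (PySem.Set.ofList l).map k := by
  induction l using List.reverseRecOn with
  | nil => simp [PySem.Set.ofList_nil]
  | append_singleton l x ih =>
    rw [List.map_append, List.map_singleton, PySem.Set.ofList_append_singleton,
      PySem.Set.ofList_append_singleton, ih]
    by_cases hx : x ∈ PySem.Set.ofList l
    · rw [PySem.Set.add_of_mem hx, PySem.Set.add_of_mem (List.mem_map_of_mem hx)]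
    · rw [PySem.Set.add_of_not_mem hx, PySem.Set.add_of_not_mem (by
        intro hm
        obtain ⟨y, hy, hyx⟩ := List.mem_map.mp hm
        exact hx (hk hyx ▸ hy)), List.map_append, List.map_singleton]

theorem pv_dedup_floordiv (g : Int) (hg : 0 < g) : ∀ (m : Nat),
    PySem.Set.ofList ((PySem.List.pyRange 0 (m : Int) 1).map (fun i => PySem.Int.floordiv i g))
      = PySem.List.pyRange 0 (pvNum (m : Int) g) 1 := by
  intro m
  induction m with
  | zero =>
    have : pvNum 0 g = 0 := by
      unfold pvNum
      have h1 : PySem.Int.floordiv 0 g = 0 := (PySem.Int.floordiv_eq_iff_of_pos hg).mpr (by constructor <;> nlinarith)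
      have h2 : PySem.Int.mod 0 g = 0 := by
        have := PySem.Int.floordiv_mul_add_mod 0 g
        rw [h1] at this; omega
      simp [h1, h2]
    simp [this, PySem.List.pyRange_one_eq_nil (by omega : (0:Int) ≤ 0)]
  | succ m ih =>
    have hm0 : (0:Int) ≤ (m:Int) := by positivity
    have hrec : PySem.List.pyRange 0 ((m:Int)+1) 1 = PySem.List.pyRange 0 (m:Int) 1 ++ [(m:Int)] :=
      PySem.List.pyRange_one_succ_right hm0
    -- abbreviations
    set q := PySem.Int.floordiv (m:Int) g with hqdef
    set r := PySem.Int.mod (m:Int) g with hrdef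
    have hqr : q * g + r = (m:Int) := PySem.Int.floordiv_mul_add_mod _ g
    have hr0 : 0 ≤ r := PySem.Int.mod_nonneg _ hg
    have hrg : r < g := PySem.Int.mod_lt _ hg
    have hq0 : 0 ≤ q := by nlinarith
    -- floordiv/mod of m+1
    have hnext : (PySem.Int.floordiv ((m:Int)+1) g = (if r + 1 = g then q + 1 else q)) ∧
        PySem.Int.mod ((m:Int)+1) g = (if r + 1 = g then 0 else r + 1) := by
      by_cases h : r + 1 = g
      · have hq' : PySem.Int.floordiv ((m:Int)+1) g = q + 1 :=
          (PySem.Int.floordiv_eq_iff_of_pos hg).mpr (by constructor <;> nlinarith)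
        refine ⟨by simp [h, hq'], ?_⟩
        have := PySem.Int.floordiv_mul_add_mod ((m:Int)+1) g
        rw [hq'] at this
        simp only [h, if_pos]
        nlinarith
      · have hlt : r + 1 < g := by omega
        have hq' : PySem.Int.floordiv ((m:Int)+1) g = q :=
          (PySem.Int.floordiv_eq_iff_of_pos hg).mpr (by constructor <;> nlinarith)
        refine ⟨by simp [h, hq'], ?_⟩
        have := PySem.Int.floordiv_mul_add_mod ((m:Int)+1) g
        rw [hq'] at this
        simp only [h, if_false]
        omega
    have hcast : ((m+1 : Nat) : Int) = (m:Int) + 1 := by push_cast; ring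
    rw [hcast, hrec, List.map_append, List.map_singleton, PySem.Set.ofList_append_singleton, ih]
    by_cases hr : r = 0
    · -- q = pvNum m, fresh element
      have hnum : pvNum (m:Int) g = q := by
        rw [pvNum, ← hqdef, ← hrdef, hr]; simp
      have hnotmem : q ∉ PySem.List.pyRange 0 (pvNum (m:Int) g) 1 := by
        rw [hnum]; intro hmem
        rcases PySem.List.mem_pyRange_one.mp hmem with ⟨_, h2⟩; omega
      rw [PySem.Set.add_of_not_mem hnotmem, hnum, ← PySem.List.pyRange_one_succ_right hq0]
      congr 1
      rw [pvNum]
      rcases hnext with ⟨h1, h2⟩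
      by_cases h : r + 1 = g
      · simp only [h, if_pos] at h1 h2
        rw [h1, h2]; simp
      · simp only [h, if_false] at h1 h2
        rw [h1, h2]; simp [show r + 1 ≠ 0 by omega]
    · -- q < pvNum m = q+1, already present
      have hnum : pvNum (m:Int) g = q + 1 := by
        rw [pvNum, ← hqdef, ← hrdef]; simp [hr]
      have hmem : q ∈ PySem.List.pyRange 0 (pvNum (m:Int) g) 1 := by
        rw [hnum]; exact PySem.List.mem_pyRange_one.mpr ⟨hq0, by omega⟩
      rw [PySem.Set.add_of_mem hmem, hnum]
      congr 1
      rw [pvNum]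
      rcases hnext with ⟨h1, h2⟩
      by_cases h : r + 1 = g
      · simp only [h, if_pos] at h1 h2
        rw [h1, h2]; simp
      · simp only [h, if_false] at h1 h2
        rw [h1, h2]; simp [show r + 1 ≠ 0 by omega]


theorem pv_A_items (xs : List String) (g : Int) :
    create_hierarchy xs g = (PySem.List.pyRange 0 (pvNum (xs.length : Int) g) 1).map
      (fun j => (pvKey j, PySem.List.slice xs (some (j * g)) (some (min (j * g + g) (xs.length : Int))))) := by
  simp only [create_hierarchy]
  rw [show (PySem.Int.floordiv (xs.length : Int) g + if PySem.Int.mod (xs.length : Int) g ≠ 0 then 1 else 0)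
      = pvNum (xs.length : Int) g from rfl]
  rw [PySem.Dict.items_foldl_insert_fresh (PySem.List.pyRange 0 (pvNum (xs.length : Int) g) 1)
    (fun node_id => "node-" ++ PySem.Int.toStr node_id)
    (fun node_id => PySem.List.slice xs (some (node_id * g)) (some (min (node_id * g + g) (xs.length : Int))))
    PySem.Dict.empty
    (fun a _ => by simp [PySem.Dict.contains_empty])
    ((PySem.List.nodup_pyRange_one 0 _).map pvKey_inj)]
  simp only [pvKey]
  rfl

theorem pv_B_keys (xs : List String) (g : Int) (hg : 0 < g) :
    (((PySem.List.enumerate xs 0).foldl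
      (fun h p => h.modify (pvKey (PySem.Int.floordiv p.1 g)) [] (fun ws => ws ++ [p.2]))
      PySem.Dict.empty)).keys = (PySem.List.pyRange 0 (pvNum (xs.length : Int) g) 1).map pvKey := by
  rw [PySem.Dict.keys_foldl_modify_key (PySem.List.enumerate xs 0)
    (fun p => pvKey (PySem.Int.floordiv p.1 g)) [] (fun d p ws => ws ++ [p.2]) PySem.Dict.empty]
  rw [PySem.Dict.keys_empty, PySem.Set.update_nil_left]
  have hmap : (PySem.List.enumerate xs 0).map (fun p => pvKey (PySem.Int.floordiv p.1 g))
      = ((PySem.List.pyRange 0 (xs.length : Int) 1).map (fun i => PySem.Int.floordiv i g)).map pvKey := by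
    have hfst := PySem.List.map_fst_enumerate xs 0
    rw [zero_add] at hfst
    rw [List.map_map, ← hfst, List.map_map]
    rfl
  rw [hmap, pv_ofList_map_inj pvKey_inj, pv_dedup_floordiv g hg]

theorem pv_B_items (xs : List String) (g : Int) (hg : 0 < g) :
    create_hierarchy_alt xs g = (PySem.List.pyRange 0 (pvNum (xs.length : Int) g) 1).map
      (fun j => (pvKey j, (xs.take (j * g + g).toNat).drop (j * g).toNat)) := by
  unfold create_hierarchy_alt
  have hkeys := pv_B_keys xs g hg
  have hnodup : (((PySem.List.enumerate xs 0).foldl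
      (fun h p => h.modify (pvKey (PySem.Int.floordiv p.1 g)) [] (fun ws => ws ++ [p.2]))
      PySem.Dict.empty)).keys.Nodup :=
    PySem.Dict.nodup_keys_foldl_modify_key _ _ _ _ _ PySem.Dict.nodup_keys_empty
  rw [show (fun (h : PySem.Dict String (List String)) (p : Int × String) =>
      h.modify ("node-" ++ PySem.Int.toStr (PySem.Int.floordiv p.1 g)) [] (fun ws => ws ++ [p.2]))
      = (fun h p => h.modify (pvKey (PySem.Int.floordiv p.1 g)) [] (fun ws => ws ++ [p.2])) from rfl]
  rw [PySem.Dict.items_eq_map_keys _ hnodup [], hkeys, List.map_map]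
  refine List.map_congr_left ?_
  intro j hj
  obtain ⟨hj0, hjlt⟩ := PySem.List.mem_pyRange_one.mp hj
  simp only [Function.comp]
  congr 1
  -- getD of the grouped dict
  have hfold : (PySem.List.enumerate xs 0).foldl
      (fun h p => h.modify (pvKey (PySem.Int.floordiv p.1 g)) [] (fun ws => ws ++ [p.2]))
      PySem.Dict.empty
      = ((PySem.List.enumerate xs 0).map (fun p => (pvKey (PySem.Int.floordiv p.1 g), p.2))).foldl
        (fun h p => h.modify p.1 [] (fun ws => ws ++ [p.2])) PySem.Dict.empty := by
    rw [List.foldl_map]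
  rw [hfold, PySem.Dict.getD_foldl_modify_append, PySem.Dict.getD_empty, List.nil_append]
  rw [List.filter_map]
  rw [List.map_map]
  have hpred : ∀ p ∈ PySem.List.enumerate xs 0,
      ((fun q => q.1 == pvKey j) ∘ (fun p => (pvKey (PySem.Int.floordiv p.1 g), p.2))) p
        = (fun p : Int × String => decide (j * g ≤ p.1 ∧ p.1 < j * g + g)) p := by
    intro p hp
    have hiff : (pvKey (PySem.Int.floordiv p.1 g) = pvKey j) ↔ (j * g ≤ p.1 ∧ p.1 < j * g + g) := by
      constructor
      · intro h
        have h2 := pvKey_inj h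
        rw [PySem.Int.floordiv_eq_iff_of_pos hg] at h2
        exact ⟨h2.1, by nlinarith [h2.2]⟩
      · intro h
        have h2 : PySem.Int.floordiv p.1 g = j := by
          rw [PySem.Int.floordiv_eq_iff_of_pos hg]
          exact ⟨h.1, by nlinarith [h.2]⟩
        rw [h2]
    simp only [Function.comp]
    rw [show ((pvKey (PySem.Int.floordiv p.1 g) == pvKey j) : Bool)
        = decide (pvKey (PySem.Int.floordiv p.1 g) = pvKey j) from Bool.beq_eq_decide_eq _ _]
    exact decide_eq_decide.mpr hiff
  rw [List.filter_congr hpred]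
  have := pv_filter_interval xs 0 (j * g) (j * g + g)
  simp only [sub_zero] at this
  exact this


theorem pv_slice_eq_take_drop (xs : List String) (g j : Int) (hg : 0 < g) (hj0 : 0 ≤ j) :
    PySem.List.slice xs (some (j * g)) (some (min (j * g + g) (xs.length : Int)))
      = (xs.take (j * g + g).toNat).drop (j * g).toNat := by
  have ha : 0 ≤ j * g := mul_nonneg hj0 hg.le
  have hb : 0 ≤ min (j * g + g) (xs.length : Int) :=
    le_min (by nlinarith) (by positivity)
  rw [PySem.List.slice_toNat xs ha hb, List.drop_take]
  by_cases hmn : j * g + g ≤ (xs.length : Int)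
  · rw [min_eq_left hmn]
  · rw [min_eq_right (by omega)]
    have hlen : (xs.drop (j * g).toNat).length = xs.length - (j * g).toNat := List.length_drop
    rw [List.take_of_length_le (by omega : (xs.drop (j * g).toNat).length ≤ ((xs.length : Int)).toNat - (j * g).toNat),
      List.take_of_length_le (by rw [hlen]; omega)]

-- ===== VERDICT (by name: the statement is the Claim_ definition above) =====
theorem create_hierarchy_spec : Claim_equal_create_hierarchy := by
  intro worker_ids gpus_per_node _ hpre
  unfold Spec_create_hierarchy
  have hg : 0 < gpus_per_node := hpre
  rw [pv_A_items worker_ids gpus_per_node, pv_B_items worker_ids gpus_per_node hg]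
  refine List.map_congr_left ?_
  intro j hj
  obtain ⟨hj0, _⟩ := PySem.List.mem_pyRange_one.mp hj
  rw [pv_slice_eq_take_drop worker_ids gpus_per_node j hg hj0]
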